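-- pv_equiv track=rewrite | github.com/ku-formal/SmarTrim-Artifact | scripts/inspect_callgraph.py | _search
-- ===== SOURCE A (Python) =====
-- from collections import deque
--
-- def _search(intcalls_dict: dict[str, list[str]], targets_dict: dict[str, bool]):
--     assert list(intcalls_dict.keys()) == list(targets_dict.keys())
--     reverse_dict: dict[str, list[str]] = {x: [] for x in intcalls_dict.keys()}
--     for fn in intcalls_dict:
--         nexts = intcalls_dict[fn]
--         for next in nexts:
--             reverse_dict[next].append(fn)
--
--     visited = {x: False for x in targets_dict.keys()}
--     q = deque()
--     for fn in targets_dict: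
--         if targets_dict[fn] == False:
--             continue
--         visited[fn] = True
--         q.append(fn)
--
--     while len(q) > 0:
--         fn: str = q.popleft()
--         nexts = reverse_dict[fn]
--         for next in nexts:
--             if visited[next] == True:
--                 continue
--             visited[next] = True
--             q.append(next)
--
--     return [fn for fn in visited.keys() if visited[fn] == True]
-- ===== SOURCE B (Python) =====
-- def _search(intcalls_dict: dict[str, list[str]], targets_dict: dict[str, bool]):
--     assert list(intcalls_dict.keys()) == list(targets_dict.keys())
--     # dataflow saturation: a function is kept if it is a target or (transitively) calls one
--     visited = {fn for fn, t in targets_dict.items() if t}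
--     for _ in range(len(targets_dict)):
--         addition = {fn for fn, nexts in intcalls_dict.items()
--                     if fn not in visited and any(n in visited for n in nexts)}
--         if not addition:
--             break
--         visited |= addition
--     return [fn for fn in targets_dict if fn in visited]
-- ===== Notes on version B (the rewrite author's own statement) =====
-- stated objective: alternative
-- what changed: Replaces the explicit reverse-adjacency construction plus deque-based BFS with a round-based dataflow saturation over a set: repeatedly add every function that calls an already-kept function until a fixpoint, so no reverse graph and no queue are ever built.
import Mathlib
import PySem

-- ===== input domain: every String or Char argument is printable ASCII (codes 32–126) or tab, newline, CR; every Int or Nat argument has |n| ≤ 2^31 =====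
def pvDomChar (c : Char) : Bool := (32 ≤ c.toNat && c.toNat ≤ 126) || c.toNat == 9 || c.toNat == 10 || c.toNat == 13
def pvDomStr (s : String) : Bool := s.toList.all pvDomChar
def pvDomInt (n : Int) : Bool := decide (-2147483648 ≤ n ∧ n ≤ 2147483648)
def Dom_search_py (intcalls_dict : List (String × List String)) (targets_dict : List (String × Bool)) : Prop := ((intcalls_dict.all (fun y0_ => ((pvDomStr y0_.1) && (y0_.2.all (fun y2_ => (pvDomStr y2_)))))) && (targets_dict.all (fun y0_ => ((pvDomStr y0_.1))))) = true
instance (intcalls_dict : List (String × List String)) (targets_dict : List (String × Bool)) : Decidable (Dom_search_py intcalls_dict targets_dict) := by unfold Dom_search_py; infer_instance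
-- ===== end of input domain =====

-- B replaces A's reverse-adjacency construction + deque BFS by a round-based dataflow
-- saturation over a set (no reverse graph, no queue); objective: alternative decomposition.

-- ===== PORT A =====
-- reverse_dict = {x: [] for x in intcalls_dict.keys()}; for fn in intcalls_dict: for next in intcalls_dict[fn]: reverse_dict[next].append(fn)
def pvRevAdd (fn : String) (rd : PySem.Dict String (List String)) (nx : String) :
    PySem.Dict String (List String) :=
  match rd.get? nx with
  | none => rd                                  -- Python raises KeyError here (excluded by Pre_)
  | some l => rd.insert nx (l ++ [fn])

def pvBuildRev (icd : PySem.Dict String (List String)) : PySem.Dict String (List String) :=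
  let rd0 := icd.keys.foldl (fun d x => d.insert x ([] : List String)) PySem.Dict.empty
  icd.items.foldl (fun rd p => p.2.foldl (pvRevAdd p.1) rd) rd0

-- number of keys still marked False (termination measure for the BFS loop)
def pvFalse (v : PySem.Dict String Bool) : Nat := v.items.countP (fun p => !p.2)

-- the body of "for next in nexts: if visited[next] == True: continue; visited[next] = True; q.append(next)"
def pvMark (vq : PySem.Dict String Bool × List String) (nx : String) :
    PySem.Dict String Bool × List String :=
  match vq.1.get? nx with
  | none => vq                                  -- Python raises KeyError here (excluded by Pre_)
  | some true => vq
  | some false => (vq.1.insert nx true, vq.2 ++ [nx])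

lemma pvCountP_flip_lt (l : List (String × Bool)) (nx : String)
    (h : (PySem.Dict.mk l).get? nx = some false) :
    (l.map (fun p => if p.1 == nx then (nx, true) else p)).countP (fun p => !p.2)
      < l.countP (fun p => !p.2) := by
  induction l with
  | nil => simp [PySem.Dict.get?] at h
  | cons hd tl ih =>
    rw [PySem.Dict.get?_mk_cons] at h
    by_cases hk : (hd.1 == nx) = true
    · simp only [hk, if_true] at h
      obtain ⟨k, v⟩ := hd
      cases h
      have hle : (tl.map (fun p => if p.1 == nx then (nx, true) else p)).countP (fun p => !p.2)
          ≤ tl.countP (fun p => !p.2) := by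
        rw [List.countP_map]
        apply List.countP_mono_left
        intro a _ ha
        simp only [Function.comp] at ha
        by_cases h2 : (a.1 == nx) = true
        · simp [h2] at ha
        · simpa [h2] using ha
      simp only [List.map_cons, List.countP_cons, hk, if_true, Bool.not_true, Bool.not_false,
        Bool.false_eq_true, if_false]
      omega
    · simp only [hk] at h
      have := ih h
      simp only [List.map_cons, List.countP_cons, if_neg hk]
      omega

lemma pvFalse_insert_lt (v : PySem.Dict String Bool) (nx : String)
    (h : v.get? nx = some false) : pvFalse (v.insert nx true) < pvFalse v := by
  have hc : v.contains nx = true := by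
    rw [PySem.Dict.contains_eq_isSome_get?, h]; rfl
  unfold pvFalse
  rw [PySem.Dict.items_insert_of_contains v true hc]
  exact pvCountP_flip_lt v.items nx h

lemma pvMark_cases (vq : PySem.Dict String Bool × List String) (nx : String) :
    pvMark vq nx = vq ∨ pvFalse (pvMark vq nx).1 < pvFalse vq.1 := by
  unfold pvMark
  cases h : vq.1.get? nx with
  | none => exact Or.inl rfl
  | some b =>
    cases b with
    | true => exact Or.inl rfl
    | false => exact Or.inr (pvFalse_insert_lt _ _ h)

lemma pvFoldMark_le (ns : List String) (vq : PySem.Dict String Bool × List String) :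
    pvFalse (ns.foldl pvMark vq).1 ≤ pvFalse vq.1 := by
  induction ns generalizing vq with
  | nil => exact Nat.le_refl _
  | cons c rest ih =>
    simp only [List.foldl_cons]
    rcases pvMark_cases vq c with h | h
    · rw [h]; exact ih vq
    · exact Nat.le_trans (ih _) (Nat.le_of_lt h)

lemma pvFoldMark_cases (ns : List String) (vq : PySem.Dict String Bool × List String) :
    ns.foldl pvMark vq = vq ∨ pvFalse (ns.foldl pvMark vq).1 < pvFalse vq.1 := by
  induction ns generalizing vq with
  | nil => exact Or.inl rfl
  | cons c rest ih =>
    simp only [List.foldl_cons]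
    rcases pvMark_cases vq c with h | h
    · rw [h]; exact ih vq
    · exact Or.inr (Nat.lt_of_le_of_lt (pvFoldMark_le rest _) h)

-- while len(q) > 0: fn = q.popleft(); for next in reverse_dict[fn]: …
def pvBfs (rd : PySem.Dict String (List String)) (v : PySem.Dict String Bool)
    (q : List String) : PySem.Dict String Bool :=
  match q with
  | [] => v
  | fn :: q' =>
      let vq := (rd.getD fn []).foldl pvMark (v, q')
      pvBfs rd vq.1 vq.2
termination_by (pvFalse v, q.length)
decreasing_by
  rcases pvFoldMark_cases (rd.getD fn []) (v, q') with h | h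
  · rw [h]; right; simp
  · left; exact h

def search_py (intcalls_dict : List (String × List String)) (targets_dict : List (String × Bool)) : List String :=
  let icd := PySem.Dict.ofList intcalls_dict
  let tdd := PySem.Dict.ofList targets_dict
  -- assert list(intcalls_dict.keys()) == list(targets_dict.keys()): raises when they differ (excluded by Pre_)
  let rd := pvBuildRev icd
  -- visited = {x: False for x in targets_dict.keys()}
  let v0 := tdd.keys.foldl (fun d x => d.insert x false) PySem.Dict.empty
  -- for fn in targets_dict: if targets_dict[fn] == False: continue; visited[fn] = True; q.append(fn)
  let vq := tdd.items.foldl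
    (fun vq p => if p.2 == false then vq else (vq.1.insert p.1 true, vq.2 ++ [p.1]))
    (v0, ([] : List String))
  let vA := pvBfs rd vq.1 vq.2
  -- return [fn for fn in visited.keys() if visited[fn] == True]
  vA.keys.filter (fun fn => vA.getD fn false)

-- ===== PORT B =====
-- for _ in range(len(targets_dict)): addition = {…}; if not addition: break; visited |= addition
def pvSat (icd : PySem.Dict String (List String)) : Nat → PySem.Set String → PySem.Set String
  | 0, v => v
  | n + 1, v =>
      let addition : PySem.Set String := PySem.Set.ofList
        ((icd.items.filter (fun p =>
            !(PySem.Set.contains v p.1) && p.2.any (fun nx => PySem.Set.contains v nx))).map (·.1))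
      if addition.isEmpty then v else pvSat icd n (PySem.Set.union v addition)

def search_py_alt (intcalls_dict : List (String × List String)) (targets_dict : List (String × Bool)) : List String :=
  let icd := PySem.Dict.ofList intcalls_dict
  let tdd := PySem.Dict.ofList targets_dict
  -- assert list(intcalls_dict.keys()) == list(targets_dict.keys()): raises when they differ (excluded by Pre_)
  -- visited = {fn for fn, t in targets_dict.items() if t}
  let visited0 : PySem.Set String := PySem.Set.ofList ((tdd.items.filter (fun p => p.2)).map (·.1))
  let visited := pvSat icd tdd.size visited0
  -- return [fn for fn in targets_dict if fn in visited]
  tdd.keys.filter (fun fn => PySem.Set.contains visited fn)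

-- ===== PRECONDITION & SPEC =====
-- Pre_ excludes exactly the inputs where A raises: the assert (differing key lists) and the
-- KeyError on a callee that is not itself a key of intcalls_dict.
def Pre_search_py (intcalls_dict : List (String × List String)) (targets_dict : List (String × Bool)) : Prop :=
  (PySem.Dict.ofList intcalls_dict).keys = (PySem.Dict.ofList targets_dict).keys ∧
  ∀ p ∈ (PySem.Dict.ofList intcalls_dict).items, ∀ nx ∈ p.2, nx ∈ (PySem.Dict.ofList intcalls_dict).keys
instance (intcalls_dict : List (String × List String)) (targets_dict : List (String × Bool)) : Decidable (Pre_search_py intcalls_dict targets_dict) := by unfold Pre_search_py; infer_instance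

def pvWitness_search_py : (List (String × List String)) × (List (String × Bool)) :=
  ([("a", ["b"]), ("b", [])], [("a", false), ("b", true)])

def Spec_search_py (intcalls_dict : List (String × List String)) (targets_dict : List (String × Bool)) (out : List String) : Prop := out = search_py_alt intcalls_dict targets_dict
instance (intcalls_dict : List (String × List String)) (targets_dict : List (String × Bool)) (out : List String) : Decidable (Spec_search_py intcalls_dict targets_dict out) := by unfold Spec_search_py; infer_instance

-- ===== CLAIM (what is proved, stated in full; the proofs are below) =====
def Claim_equal_search_py : Prop := ∀ (intcalls_dict : List (String × List String)) (targets_dict : List (String × Bool)), Dom_search_py intcalls_dict targets_dict → Pre_search_py intcalls_dict targets_dict → Spec_search_py intcalls_dict targets_dict (search_py intcalls_dict targets_dict)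


-- ===== LEMMAS AND PROOFS =====

-- reverse reachability along call edges from the true-valued targets
inductive pvRch (icd : PySem.Dict String (List String)) (tdd : PySem.Dict String Bool) : String → Prop
  | seed (x : String) : tdd.getD x false = true → pvRch icd tdd x
  | step (c m : String) : c ∈ icd.keys → m ∈ icd.getD c [] → pvRch icd tdd m → pvRch icd tdd c

-- initial all-False dict: every lookup is False, keys are the folded-in keys
lemma pvInit_getD {ν : Type} (dflt : ν) (ks : List String) (d : PySem.Dict String ν) (m : String)
    (hd : d.getD m dflt = dflt) :
    (ks.foldl (fun d x => d.insert x dflt) d).getD m dflt = dflt := by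
  induction ks generalizing d with
  | nil => exact hd
  | cons k rest ih =>
    simp only [List.foldl_cons]
    exact ih _ (by rw [PySem.Dict.getD_insert]; split <;> simp [hd])

lemma pvInit_keys {ν : Type} (dflt : ν) (ks : List String) (hnd : ks.Nodup) :
    (ks.foldl (fun d x => d.insert x dflt) (PySem.Dict.empty (κ := String) (ν := ν))).keys = ks := by
  have := PySem.Dict.keys_foldl_insert (ν := ν) ks (fun _ _ => dflt) PySem.Dict.empty
  rw [this, PySem.Dict.keys_empty]
  exact PySem.Set.ofList_eq_self_of_nodup ks hnd

-- keys are unchanged by pvRevAdd folds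
lemma pvRevAdd_fold_keys (ns : List String) (fn : String) (rd : PySem.Dict String (List String)) :
    (ns.foldl (pvRevAdd fn) rd).keys = rd.keys := by
  induction ns generalizing rd with
  | nil => rfl
  | cons nx rest ih =>
    simp only [List.foldl_cons]
    rw [ih]
    unfold pvRevAdd
    cases h : rd.get? nx with
    | none => rfl
    | some l =>
      exact PySem.Dict.keys_insert_of_contains rd _ (by rw [PySem.Dict.contains_eq_isSome_get?, h]; rfl)

lemma pvRevAdd_fold_getD_mem (ns : List String) (fn : String)
    (rd : PySem.Dict String (List String)) (m c : String)
    (hns : ∀ nx ∈ ns, nx ∈ rd.keys) :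
    (c ∈ (ns.foldl (pvRevAdd fn) rd).getD m [] ↔ c ∈ rd.getD m [] ∨ (c = fn ∧ m ∈ ns)) := by
  induction ns generalizing rd with
  | nil => simp
  | cons nx rest ih =>
    have hcont : rd.contains nx = true := (PySem.Dict.contains_iff_mem_keys rd nx).2 (hns nx (by simp))
    rw [PySem.Dict.contains_eq_isSome_get?] at hcont
    obtain ⟨l, hl⟩ : ∃ l, rd.get? nx = some l := by
      cases h : rd.get? nx with
      | none => rw [h] at hcont; simp at hcont
      | some l => exact ⟨l, rfl⟩
    have hstep : pvRevAdd fn rd nx = rd.insert nx (l ++ [fn]) := by unfold pvRevAdd; rw [hl]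
    have hkeys : (rd.insert nx (l ++ [fn])).keys = rd.keys :=
      PySem.Dict.keys_insert_of_contains rd _ (by rw [PySem.Dict.contains_eq_isSome_get?, hl]; rfl)
    simp only [List.foldl_cons, hstep]
    rw [ih _ (fun x hx => by rw [hkeys]; exact hns x (by simp [hx]))]
    rw [PySem.Dict.getD_insert]
    by_cases hm : m = nx
    · subst hm
      rw [if_pos rfl, PySem.Dict.getD_of_get?_eq_some rd [] hl]
      simp only [List.mem_append, List.mem_cons]
      tauto
    · rw [if_neg hm]
      simp only [List.mem_cons]
      tauto

lemma pvBuildRev_outer (icd : PySem.Dict String (List String))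
    (l : List (String × List String)) (rd : PySem.Dict String (List String))
    (hkeys : rd.keys = icd.keys)
    (hcal : ∀ p ∈ l, ∀ nx ∈ p.2, nx ∈ icd.keys) (m c : String) :
    (c ∈ (l.foldl (fun rd p => p.2.foldl (pvRevAdd p.1) rd) rd).getD m [] ↔
      c ∈ rd.getD m [] ∨ ∃ p ∈ l, c = p.1 ∧ m ∈ p.2) := by
  induction l generalizing rd with
  | nil => simp
  | cons p rest ih =>
    simp only [List.foldl_cons]
    have hk2 : (p.2.foldl (pvRevAdd p.1) rd).keys = icd.keys := by
      rw [pvRevAdd_fold_keys, hkeys]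
    rw [ih _ hk2 (fun q hq => hcal q (by simp [hq]))]
    rw [pvRevAdd_fold_getD_mem p.2 p.1 rd m c
      (fun nx hnx => by rw [hkeys]; exact hcal p (by simp) nx hnx)]
    simp only [List.mem_cons]
    constructor
    · rintro ((h | h) | ⟨q, hq, h⟩)
      · exact Or.inl h
      · exact Or.inr ⟨p, Or.inl rfl, h⟩
      · exact Or.inr ⟨q, Or.inr hq, h⟩
    · rintro (h | ⟨q, (rfl | hq), h⟩)
      · exact Or.inl (Or.inl h)
      · exact Or.inl (Or.inr h)
      · exact Or.inr ⟨q, hq, h⟩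

lemma pvGetD_mem_items (icd : PySem.Dict String (List String)) (c : String)
    (hnic : icd.keys.Nodup) (hc : c ∈ icd.keys) : (c, icd.getD c []) ∈ icd.items := by
  have hcont : icd.contains c = true := (PySem.Dict.contains_iff_mem_keys icd c).2 hc
  rw [PySem.Dict.contains_eq_isSome_get?] at hcont
  obtain ⟨w, hw⟩ : ∃ w, icd.get? c = some w := by
    cases h : icd.get? c with
    | none => rw [h] at hcont; simp at hcont
    | some w => exact ⟨w, rfl⟩
  rw [PySem.Dict.getD_of_get?_eq_some icd [] hw]
  exact ((PySem.Dict.get?_eq_some_iff_mem_items icd c w hnic).1 hw)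

lemma pvBuildRev_mem (icd : PySem.Dict String (List String)) (hnic : icd.keys.Nodup)
    (hcal : ∀ p ∈ icd.items, ∀ nx ∈ p.2, nx ∈ icd.keys) (m c : String) :
    (c ∈ (pvBuildRev icd).getD m [] ↔ c ∈ icd.keys ∧ m ∈ icd.getD c []) := by
  unfold pvBuildRev
  have h0k : (icd.keys.foldl (fun d x => d.insert x ([] : List String)) PySem.Dict.empty).keys
      = icd.keys := pvInit_keys [] icd.keys hnic
  have h0 : ∀ m', (icd.keys.foldl (fun d x => d.insert x ([] : List String))
      PySem.Dict.empty).getD m' [] = [] := by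
    intro m'
    exact pvInit_getD [] icd.keys PySem.Dict.empty m' (by rw [PySem.Dict.getD_empty])
  rw [pvBuildRev_outer icd icd.items _ h0k hcal m c, h0]
  simp only [List.not_mem_nil, false_or]
  constructor
  · rintro ⟨p, hp, rfl, hm⟩
    refine ⟨PySem.Dict.mem_keys_of_mem_items icd hp, ?_⟩
    obtain ⟨k, ns⟩ := p
    rw [PySem.Dict.getD_of_mem_items icd hp hnic []]
    exact hm
  · rintro ⟨hc, hm⟩
    exact ⟨(c, icd.getD c []), pvGetD_mem_items icd c hnic hc, rfl, hm⟩

lemma pvFoldMark_spec (ns : List String) (v : PySem.Dict String Bool) (q : List String)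
    (hns : ∀ c ∈ ns, c ∈ v.keys) :
    (ns.foldl pvMark (v, q)).1.keys = v.keys ∧
    (∀ x, v.getD x false = true → (ns.foldl pvMark (v, q)).1.getD x false = true) ∧
    (∀ c ∈ ns, (ns.foldl pvMark (v, q)).1.getD c false = true) ∧
    (∀ x, (ns.foldl pvMark (v, q)).1.getD x false = true → v.getD x false = true ∨ x ∈ ns) ∧
    (∀ x ∈ q, x ∈ (ns.foldl pvMark (v, q)).2) ∧
    (∀ x ∈ (ns.foldl pvMark (v, q)).2, x ∈ q ∨ x ∈ ns) ∧
    (∀ x, (ns.foldl pvMark (v, q)).1.getD x false = true → v.getD x false = false →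
      x ∈ (ns.foldl pvMark (v, q)).2) := by
  induction ns generalizing v q with
  | nil =>
    dsimp only [List.foldl_nil]
    refine ⟨rfl, fun x h => h, by simp, fun x h => Or.inl h, fun x h => h,
      fun x h => Or.inl h, fun x h1 h2 => ?_⟩
    rw [h1] at h2; cases h2
  | cons c rest ih =>
    have hcont : v.contains c = true := (PySem.Dict.contains_iff_mem_keys v c).2 (hns c (by simp))
    rw [PySem.Dict.contains_eq_isSome_get?] at hcont
    obtain ⟨b, hb⟩ : ∃ b, v.get? c = some b := by
      cases h : v.get? c with
      | none => rw [h] at hcont; simp at hcont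
      | some b => exact ⟨b, rfl⟩
    simp only [List.foldl_cons]
    cases b with
    | true =>
      have hm : pvMark (v, q) c = (v, q) := by unfold pvMark; rw [hb]
      rw [hm]
      obtain ⟨i1, i2, i3, i4, i5, i6, i7⟩ := ih v q (fun x hx => hns x (by simp [hx]))
      refine ⟨i1, i2, ?_, ?_, i5, ?_, i7⟩
      · intro x hx
        rcases List.mem_cons.1 hx with rfl | hx
        · exact i2 x (PySem.Dict.getD_of_get?_eq_some v false hb)
        · exact i3 x hx
      · intro x hx
        rcases i4 x hx with h | h
        · exact Or.inl h
        · exact Or.inr (by simp [h])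
      · intro x hx
        rcases i6 x hx with h | h
        · exact Or.inl h
        · exact Or.inr (by simp [h])
    | false =>
      have hm : pvMark (v, q) c = (v.insert c true, q ++ [c]) := by unfold pvMark; rw [hb]
      rw [hm]
      have hkeys : (v.insert c true).keys = v.keys :=
        PySem.Dict.keys_insert_of_contains v _ (by rw [PySem.Dict.contains_eq_isSome_get?, hb]; rfl)
      have hget : ∀ x, (v.insert c true).getD x false = if x = c then true else v.getD x false :=
        fun x => PySem.Dict.getD_insert v c x true false
      obtain ⟨i1, i2, i3, i4, i5, i6, i7⟩ :=
        ih (v.insert c true) (q ++ [c]) (fun x hx => by rw [hkeys]; exact hns x (by simp [hx]))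
      refine ⟨by rw [i1, hkeys], ?_, ?_, ?_, ?_, ?_, ?_⟩
      · intro x hx
        refine i2 x ?_
        rw [hget]; split <;> simp [hx]
      · intro x hx
        rcases List.mem_cons.1 hx with rfl | hx
        · exact i2 x (by rw [hget, if_pos rfl])
        · exact i3 x hx
      · intro x hx
        rcases i4 x hx with h | h
        · rw [hget] at h
          by_cases hxc : x = c
          · exact Or.inr (by simp [hxc])
          · rw [if_neg hxc] at h; exact Or.inl h
        · exact Or.inr (by simp [h])
      · intro x hx
        exact i5 x (by simp [hx])
      · intro x hx
        rcases i6 x hx with h | h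
        · rcases List.mem_append.1 h with h | h
          · exact Or.inl h
          · simp only [List.mem_singleton] at h; exact Or.inr (by simp [h])
        · exact Or.inr (by simp [h])
      · intro x hx hfx
        by_cases hxc : x = c
        · exact i5 x (by simp [hxc])
        · refine i7 x hx ?_
          rw [hget, if_neg hxc]; exact hfx

-- the BFS loop invariant
def pvInv (icd : PySem.Dict String (List String)) (tdd : PySem.Dict String Bool)
    (rd : PySem.Dict String (List String)) (v : PySem.Dict String Bool) (q : List String) : Prop :=
  v.keys = tdd.keys ∧
  (∀ x ∈ q, v.getD x false = true) ∧
  (∀ x, v.getD x false = true → pvRch icd tdd x) ∧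
  (∀ x, v.getD x false = true → x ∉ q → ∀ c ∈ rd.getD x [], v.getD c false = true)

lemma pvBfs_spec (icd : PySem.Dict String (List String)) (tdd : PySem.Dict String Bool)
    (rd : PySem.Dict String (List String))
    (hrd : ∀ m c, c ∈ rd.getD m [] ↔ c ∈ icd.keys ∧ m ∈ icd.getD c [])
    (hk : icd.keys = tdd.keys) (v : PySem.Dict String Bool) (q : List String)
    (hinv : pvInv icd tdd rd v q) :
    pvInv icd tdd rd (pvBfs rd v q) [] ∧
    (∀ x, v.getD x false = true → (pvBfs rd v q).getD x false = true) := by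
  revert hinv
  induction v, q using pvBfs.induct (rd := rd) with
  | case1 v =>
    intro hinv
    rw [pvBfs]
    exact ⟨hinv, fun x h => h⟩
  | case2 v fn q' vq ih =>
    intro hinv
    rw [pvBfs]
    obtain ⟨h1, h2, h3, h4⟩ := hinv
    have hns : ∀ c ∈ rd.getD fn [], c ∈ v.keys := by
      intro c hc
      rw [h1, ← hk]
      exact ((hrd fn c).1 hc).1
    obtain ⟨c1, c2, c3, c4, c5, c6, c7⟩ := pvFoldMark_spec (rd.getD fn []) v q' hns
    have hfn : v.getD fn false = true := h2 fn (by simp)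
    have hRfn : pvRch icd tdd fn := h3 fn hfn
    refine ?_
    have hinv' : pvInv icd tdd rd ((rd.getD fn []).foldl pvMark (v, q')).1
        ((rd.getD fn []).foldl pvMark (v, q')).2 := by
      refine ⟨by rw [c1, h1], ?_, ?_, ?_⟩
      · intro x hx
        rcases c6 x hx with h | h
        · exact c2 x (h2 x (by simp [h]))
        · exact c3 x h
      · intro x hx
        rcases c4 x hx with h | h
        · exact h3 x h
        · obtain ⟨hxk, hfx⟩ := (hrd fn x).1 h
          exact pvRch.step x fn hxk hfx hRfn
      · intro x hmx hxr2 c hc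
        by_cases hxfn : x = fn
        · subst hxfn
          exact c3 c hc
        · by_cases hvx : v.getD x false = true
          · have hxq' : x ∉ q' := fun hq => hxr2 (c5 x hq)
            have hxq : x ∉ fn :: q' := by simp [hxfn, hxq']
            exact c2 c (h4 x hvx hxq c hc)
          · exact absurd (c7 x hmx (eq_false_of_ne_true hvx)) hxr2
    obtain ⟨r1, r2⟩ := ih hinv'
    exact ⟨r1, fun x hx => r2 x (c2 x hx)⟩

-- the seed loop of A: mark every true target and queue it
lemma pvSeed_spec (l : List (String × Bool)) (v : PySem.Dict String Bool) (q : List String)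
    (hl : ∀ p ∈ l, p.1 ∈ v.keys) :
    (l.foldl (fun vq p => if p.2 == false then vq else
        (vq.1.insert p.1 true, vq.2 ++ [p.1])) (v, q)).1.keys = v.keys ∧
    (∀ x, (l.foldl (fun vq p => if p.2 == false then vq else
        (vq.1.insert p.1 true, vq.2 ++ [p.1])) (v, q)).1.getD x false = true ↔
      v.getD x false = true ∨ (x, true) ∈ l) ∧
    (∀ x, x ∈ (l.foldl (fun vq p => if p.2 == false then vq else
        (vq.1.insert p.1 true, vq.2 ++ [p.1])) (v, q)).2 ↔ x ∈ q ∨ (x, true) ∈ l) := by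
  induction l generalizing v q with
  | nil =>
    dsimp only [List.foldl_nil]
    exact ⟨rfl, fun x => by simp, fun x => by simp⟩
  | cons p rest ih =>
    obtain ⟨k, b⟩ := p
    simp only [List.foldl_cons]
    cases b with
    | false =>
      simp only [BEq.rfl, if_true]
      obtain ⟨i1, i2, i3⟩ := ih v q (fun p hp => hl p (by simp [hp]))
      refine ⟨i1, fun x => ?_, fun x => ?_⟩
      · rw [i2]
        simp [Prod.ext_iff]
      · rw [i3]
        simp [Prod.ext_iff]
    | true =>
      have hkv : k ∈ v.keys := hl (k, true) (by simp)
      have hkeys : (v.insert k true).keys = v.keys :=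
        PySem.Dict.keys_insert_of_contains v _ ((PySem.Dict.contains_iff_mem_keys v k).2 hkv)
      simp only [show ((true : Bool) == false) = false from rfl, Bool.false_eq_true, if_false]
      obtain ⟨i1, i2, i3⟩ := ih (v.insert k true) (q ++ [k])
        (fun p hp => by rw [hkeys]; exact hl p (by simp [hp]))
      refine ⟨by rw [i1, hkeys], fun x => ?_, fun x => ?_⟩
      · rw [i2, PySem.Dict.getD_insert]
        by_cases hxk : x = k
        · subst hxk; simp
        · simp [hxk, Prod.ext_iff]
      · rw [i3]
        simp only [List.mem_append, List.mem_cons, Prod.mk.injEq]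
        by_cases hxk : x = k
        · subst hxk; simp
        · simp [hxk]

lemma pvMemItems_iff_getD (tdd : PySem.Dict String Bool) (hntd : tdd.keys.Nodup) (x : String) :
    (x, true) ∈ tdd.items ↔ tdd.getD x false = true := by
  constructor
  · intro h
    exact PySem.Dict.getD_of_mem_items tdd h hntd false
  · intro h
    rw [PySem.Dict.getD_eq_get?_getD] at h
    cases hg : tdd.get? x with
    | none => rw [hg] at h; cases h
    | some b =>
      rw [hg] at h
      cases b with
      | false => cases h
      | true => exact (PySem.Dict.get?_eq_some_iff_mem_items tdd x true hntd).1 hg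

-- ===== B-side lemmas =====
lemma pvSat_mono (icd : PySem.Dict String (List String)) (n : Nat) (v : PySem.Set String) :
    ∀ x ∈ v, x ∈ pvSat icd n v := by
  induction n generalizing v with
  | zero => intro x hx; exact hx
  | succ n ih =>
    intro x hx
    unfold pvSat
    dsimp only
    split
    · exact hx
    · exact ih _ x ((PySem.Set.mem_union _ _ x).2 (Or.inl hx))

lemma pvSat_sound (icd : PySem.Dict String (List String)) (tdd : PySem.Dict String Bool)
    (hnic : icd.keys.Nodup) (n : Nat) (v : PySem.Set String)
    (hv : ∀ x ∈ v, pvRch icd tdd x) : ∀ x ∈ pvSat icd n v, pvRch icd tdd x := by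
  induction n generalizing v with
  | zero => exact hv
  | succ n ih =>
    unfold pvSat
    dsimp only
    split
    · exact hv
    · refine ih _ ?_
      intro x hx
      rcases (PySem.Set.mem_union _ _ x).1 hx with h | h
      · exact hv x h
      · rw [PySem.Set.mem_ofList] at h
        obtain ⟨p, hp, rfl⟩ := List.mem_map.1 h
        rw [List.mem_filter] at hp
        obtain ⟨hpi, hcond⟩ := hp
        rw [Bool.and_eq_true, List.any_eq_true] at hcond
        obtain ⟨nx, hnx, hnxv⟩ := hcond.2
        rw [PySem.Set.contains_iff] at hnxv
        refine pvRch.step p.1 nx (PySem.Dict.mem_keys_of_mem_items icd hpi) ?_ (hv nx hnxv)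
        rw [show icd.getD p.1 [] = p.2 from PySem.Dict.getD_of_mem_items icd hpi hnic []]
        exact hnx

lemma pvCountP_not_mem_lt (K : List String) (v v' : List String)
    (hsub : ∀ k, k ∈ v → k ∈ v') (x : String) (hxK : x ∈ K) (hxv : x ∉ v) (hxv' : x ∈ v') :
    K.countP (fun k => !decide (k ∈ v')) < K.countP (fun k => !decide (k ∈ v)) := by
  have hmono : ∀ (L : List String), L.countP (fun k => !decide (k ∈ v'))
      ≤ L.countP (fun k => !decide (k ∈ v)) := by
    intro L
    apply List.countP_mono_left
    intro a _ ha
    simp only [Bool.not_eq_true', decide_eq_false_iff_not] at ha ⊢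
    exact fun hav => ha (hsub a hav)
  induction K with
  | nil => cases hxK
  | cons k rest ih =>
    simp only [List.countP_cons]
    by_cases hkx : k = x
    · subst hkx
      have h1 : (!decide (k ∈ v')) = false := by simp [hxv']
      have h2 : (!decide (k ∈ v)) = true := by simp [hxv]
      rw [h1, h2]
      simp only [Bool.false_eq_true, if_false, if_true]
      have := hmono rest
      omega
    · have hx' : x ∈ rest := by
        rcases List.mem_cons.1 hxK with h | h
        · exact absurd h.symm hkx
        · exact h
      have := ih hx'
      have hle : (if (!decide (k ∈ v')) = true then 1 else 0)
          ≤ (if (!decide (k ∈ v)) = true then 1 else 0) := by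
        by_cases hkv : k ∈ v
        · simp [hsub k hkv, hkv]
        · simp only [hkv, decide_false, Bool.not_false, if_true]
          split <;> omega
      omega

lemma pvSat_closed (icd : PySem.Dict String (List String)) (n : Nat) (v : PySem.Set String)
    (hcard : icd.keys.countP (fun k => !decide (k ∈ v)) ≤ n) :
    ∀ p ∈ icd.items, ∀ nx ∈ p.2, nx ∈ pvSat icd n v → p.1 ∈ pvSat icd n v := by
  induction n generalizing v with
  | zero =>
    intro p hp nx hnx hmem
    have hall : ∀ k ∈ icd.keys, ¬ (!decide (k ∈ v)) = true := by
      intro k hk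
      exact List.countP_eq_zero.1 (Nat.le_zero.1 hcard) k hk
    have := hall p.1 (PySem.Dict.mem_keys_of_mem_items icd hp)
    simp only [Bool.not_eq_true', decide_eq_false_iff_not, not_not] at this
    exact this
  | succ n ih =>
    intro p hp nx hnx hmem
    unfold pvSat at hmem ⊢
    dsimp only at hmem ⊢
    by_cases hemp : (PySem.Set.ofList ((icd.items.filter (fun p =>
        !(PySem.Set.contains v p.1) && p.2.any (fun nx => PySem.Set.contains v nx))).map (·.1))).isEmpty
    · rw [if_pos hemp] at hmem ⊢
      by_cases hpv : p.1 ∈ v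
      · exact hpv
      · exfalso
        have hcond : (!(PySem.Set.contains v p.1) && p.2.any (fun nx => PySem.Set.contains v nx)) = true := by
          rw [Bool.and_eq_true]
          constructor
          · simp only [Bool.not_eq_true']
            rw [Bool.eq_false_iff]
            intro hc
            exact hpv ((PySem.Set.contains_iff v p.1).1 hc)
          · rw [List.any_eq_true]
            exact ⟨nx, hnx, (PySem.Set.contains_iff v nx).2 hmem⟩
        have hmemadd : p.1 ∈ (PySem.Set.ofList ((icd.items.filter (fun p =>
            !(PySem.Set.contains v p.1) && p.2.any (fun nx => PySem.Set.contains v nx))).map (·.1))) := by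
          rw [PySem.Set.mem_ofList]
          exact List.mem_map.2 ⟨p, List.mem_filter.2 ⟨hp, hcond⟩, rfl⟩
        rw [List.isEmpty_iff] at hemp
        rw [hemp] at hmemadd
        cases hmemadd
    · rw [if_neg hemp] at hmem ⊢
      refine ih _ ?_ p hp nx hnx hmem
      obtain ⟨y, hy⟩ := List.exists_mem_of_ne_nil _ (by
        intro hnil
        rw [List.isEmpty_iff] at hemp
        exact hemp hnil)
      have hy' := hy
      rw [PySem.Set.mem_ofList] at hy'
      obtain ⟨p0, hp0, rfl⟩ := List.mem_map.1 hy'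
      rw [List.mem_filter] at hp0
      obtain ⟨hp0i, hcond0⟩ := hp0
      rw [Bool.and_eq_true] at hcond0
      have hy_not : p0.1 ∉ v := by
        have := hcond0.1
        simp only [Bool.not_eq_true'] at this
        intro hin
        rw [(PySem.Set.contains_iff v p0.1).2 hin] at this
        cases this
      have hlt := pvCountP_not_mem_lt icd.keys v (PySem.Set.union v _)
        (fun k hk => (PySem.Set.mem_union _ _ k).2 (Or.inl hk)) p0.1
        (PySem.Dict.mem_keys_of_mem_items icd hp0i) hy_not
        ((PySem.Set.mem_union _ _ p0.1).2 (Or.inr hy))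
      omega

-- ===== VERDICT (by name: the statement is the Claim_ definition above) =====
theorem search_py_spec : Claim_equal_search_py := by
  unfold Claim_equal_search_py
  intro ic td _ hpre
  unfold Spec_search_py search_py search_py_alt
  obtain ⟨hk, hcal⟩ := hpre
  set icd := PySem.Dict.ofList ic with hicd
  set tdd := PySem.Dict.ofList td with htdd
  have hnic : icd.keys.Nodup := PySem.Dict.nodup_keys_ofList ic
  have hntd : tdd.keys.Nodup := PySem.Dict.nodup_keys_ofList td
  have hrd : ∀ m c, c ∈ (pvBuildRev icd).getD m [] ↔ c ∈ icd.keys ∧ m ∈ icd.getD c [] :=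
    fun m c => pvBuildRev_mem icd hnic hcal m c
  have hv0k : (tdd.keys.foldl (fun d x => d.insert x false) PySem.Dict.empty).keys = tdd.keys :=
    pvInit_keys false tdd.keys hntd
  have hv0 : ∀ x, (tdd.keys.foldl (fun d x => d.insert x false) PySem.Dict.empty).getD x false
      = false :=
    fun x => pvInit_getD false tdd.keys _ x (by rw [PySem.Dict.getD_empty])
  obtain ⟨s1, s2, s3⟩ := pvSeed_spec tdd.items
    (tdd.keys.foldl (fun d x => d.insert x false) PySem.Dict.empty) []
    (fun p hp => by rw [hv0k]; exact PySem.Dict.mem_keys_of_mem_items tdd hp)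
  set sf := tdd.items.foldl (fun vq p => if p.2 == false then vq else
      (vq.1.insert p.1 true, vq.2 ++ [p.1]))
      (tdd.keys.foldl (fun d x => d.insert x false) PySem.Dict.empty, ([] : List String)) with hsf
  have hinv0 : pvInv icd tdd (pvBuildRev icd) sf.1 sf.2 := by
    refine ⟨by rw [s1, hv0k], ?_, ?_, ?_⟩
    · intro x hx
      rcases (s3 x).1 hx with h | h
      · cases h
      · exact (s2 x).2 (Or.inr h)
    · intro x hx
      rcases (s2 x).1 hx with h | h
      · rw [hv0 x] at h; cases h
      · exact pvRch.seed x ((pvMemItems_iff_getD tdd hntd x).1 h)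
    · intro x hx hxq c hc
      rcases (s2 x).1 hx with h | h
      · rw [hv0 x] at h; cases h
      · exact absurd ((s3 x).2 (Or.inr h)) hxq
  obtain ⟨⟨f1, f2, f3, f4⟩, fmono⟩ := pvBfs_spec icd tdd (pvBuildRev icd) hrd hk sf.1 sf.2 hinv0
  have hA : ∀ x, (pvBfs (pvBuildRev icd) sf.1 sf.2).getD x false = true ↔ pvRch icd tdd x := by
    intro x
    constructor
    · exact f3 x
    · intro h
      induction h with
      | seed y hy => exact fmono y ((s2 y).2 (Or.inr ((pvMemItems_iff_getD tdd hntd y).2 hy)))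
      | step c m hc hm _ ihm => exact f4 m ihm (by simp) c ((hrd m c).2 ⟨hc, hm⟩)
  set v0b := PySem.Set.ofList ((tdd.items.filter (fun p => p.2)).map (·.1)) with hv0b
  have hv0bm : ∀ x, x ∈ v0b ↔ (x, true) ∈ tdd.items := by
    intro x
    rw [hv0b, PySem.Set.mem_ofList]
    constructor
    · intro h
      obtain ⟨p, hp, rfl⟩ := List.mem_map.1 h
      rw [List.mem_filter] at hp
      obtain ⟨a, b⟩ := p
      obtain ⟨h1, h2⟩ := hp
      dsimp only at h2 ⊢
      rw [show b = true from h2] at h1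
      exact h1
    · intro h
      exact List.mem_map.2 ⟨(x, true), List.mem_filter.2 ⟨h, rfl⟩, rfl⟩
  have hB : ∀ x, x ∈ pvSat icd tdd.size v0b ↔ pvRch icd tdd x := by
    intro x
    constructor
    · apply pvSat_sound icd tdd hnic
      intro y hy
      exact pvRch.seed y ((pvMemItems_iff_getD tdd hntd y).1 ((hv0bm y).1 hy))
    · intro h
      induction h with
      | seed y hy =>
        exact pvSat_mono icd _ v0b y ((hv0bm y).2 ((pvMemItems_iff_getD tdd hntd y).2 hy))
      | step c m hc hm _ ihm =>
        have hlen : icd.keys.length = tdd.size := by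
          rw [hk]
          simp [PySem.Dict.keys, PySem.Dict.size]
        have hcard : icd.keys.countP (fun k => !decide (k ∈ v0b)) ≤ tdd.size := by
          calc icd.keys.countP (fun k => !decide (k ∈ v0b)) ≤ icd.keys.length :=
                List.countP_le_length
            _ = tdd.size := hlen
        exact pvSat_closed icd tdd.size v0b hcard (c, icd.getD c [])
          (pvGetD_mem_items icd c hnic hc) m hm ihm
  show ((pvBfs (pvBuildRev icd) sf.1 sf.2).keys.filter
      (fun fn => (pvBfs (pvBuildRev icd) sf.1 sf.2).getD fn false)) =
    (tdd.keys.filter (fun fn => PySem.Set.contains (pvSat icd tdd.size v0b) fn))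
  rw [f1]
  apply List.filter_congr
  intro fn _
  apply Bool.coe_iff_coe.mp
  rw [PySem.Set.contains_iff, hA fn, hB fn]
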